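-- pv_equiv track=rewrite | github.com/pypi-data/pypi-mirror-402 | packages/absfuyu/absfuyu-6.3.0-py3-none-any.whl/absfuyu/core/docstring.py | _calculate_white_space
-- ===== SOURCE A (Python) =====
-- def _calculate_white_space(docs: str | None) -> int:
--     """
--     Calculates the number of leading white spaces
--     in __doc__ of original function
--     """
--
--     res = 0
--     if docs is None:
--         return res
--
--     try:
--         # Replace tabs with space and split line
--         lines = docs.expandtabs(4).splitlines()
--     except UnicodeError:
--         return res
--     else:
--         # Get indentation of each line and unique it
--         indent_set = {len(line) - len(line.lstrip()) for line in lines[1:]}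
--         # Drop 0
--         res_list = sorted([x for x in indent_set if x > 0])
--
--     if res_list:
--         return res_list[0]
--     return res
-- ===== SOURCE B (Python) =====
-- def _calculate_white_space(docs: str | None) -> int:
--     """Single streaming pass keeping the smallest positive indent (no set/sort)."""
--     if docs is None:
--         return 0
--     try:
--         lines = docs.expandtabs(4).splitlines()
--     except UnicodeError:
--         return 0
--     smallest = None
--     for line in lines[1:]:
--         indent = len(line) - len(line.lstrip())
--         if indent > 0:
--             if smallest is None or indent < smallest:
--                 smallest = indent
--     return smallest if smallest is not None else 0
-- ===== Notes on version B (the rewrite author's own statement) =====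
-- stated objective: simpler
-- what changed: Replaces the build-a-set, filter, sort and index-[0] pipeline with one streaming pass over lines[1:] that maintains a single running smallest-positive-indent variable.
import Mathlib
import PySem

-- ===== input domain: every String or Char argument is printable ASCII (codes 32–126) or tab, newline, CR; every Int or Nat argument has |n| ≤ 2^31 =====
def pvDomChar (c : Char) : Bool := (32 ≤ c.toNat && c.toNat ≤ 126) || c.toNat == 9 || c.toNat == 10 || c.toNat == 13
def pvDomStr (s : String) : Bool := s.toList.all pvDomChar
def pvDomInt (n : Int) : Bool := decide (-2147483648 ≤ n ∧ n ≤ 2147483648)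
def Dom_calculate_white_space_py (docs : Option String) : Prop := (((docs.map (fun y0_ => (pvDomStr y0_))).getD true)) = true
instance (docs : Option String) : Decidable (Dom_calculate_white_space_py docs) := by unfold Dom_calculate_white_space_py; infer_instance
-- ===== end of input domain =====

-- B replaces A's build-set / filter / sort / index-[0] pipeline with one streaming pass
-- keeping a running smallest-positive-indent variable (objective: simpler).


-- ===== PORT A =====
-- s.expandtabs(4), ported by hand (PySem has no expandtabs): exact CPython semantics —
-- a running column, '\t' pads with spaces to the next multiple of 4, '\n'/'\r' reset the column.
def pvExpandTabs4 (cs : List Char) : List Char :=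
  (cs.foldl (fun (st : List Char × Nat) c =>
    if c = '\t' then (st.1 ++ List.replicate (4 - st.2 % 4) ' ', st.2 + (4 - st.2 % 4))
    else if c = '\n' ∨ c = '\r' then (st.1 ++ [c], 0)
    else (st.1 ++ [c], st.2 + 1)) ([], 0)).1

-- len(line) - len(line.lstrip()), used by both Pythons
def pvIndent (line : String) : Int :=
  PySem.Str.len line - PySem.Str.len (PySem.Str.lstrip line)

-- the try/except UnicodeError can never fire on str input; ported without it
def calculate_white_space_py (docs : Option String) : Int :=
  match docs with
  | none => 0
  | some d =>
      let lines := PySem.Str.splitlines (String.ofList (pvExpandTabs4 d.toList))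
      let indent_set : PySem.Set Int :=
        PySem.Set.ofList ((PySem.List.slice lines (some 1) none).map pvIndent)
      let res_list := PySem.List.sorted (indent_set.filter (fun x => decide (0 < x))) (fun x => x)
      match res_list with
      | [] => 0
      | x :: _ => x

-- ===== PORT B =====
-- the body of B's loop: update the running smallest positive indent
def pvMinPosStep (best : Option Int) (ind : Int) : Option Int :=
  if 0 < ind then
    match best with
    | none => some ind
    | some m => if ind < m then some ind else best
  else best

def calculate_white_space_py_alt (docs : Option String) : Int :=
  match docs with
  | none => 0
  | some d =>
      let lines := PySem.Str.splitlines (String.ofList (pvExpandTabs4 d.toList))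
      let smallest := (PySem.List.slice lines (some 1) none).foldl
        (fun best line => pvMinPosStep best (pvIndent line)) none
      smallest.getD 0

-- ===== PRECONDITION & SPEC =====
def Spec_calculate_white_space_py (docs : Option String) (out : Int) : Prop := out = calculate_white_space_py_alt docs
instance (docs : Option String) (out : Int) : Decidable (Spec_calculate_white_space_py docs out) := by unfold Spec_calculate_white_space_py; infer_instance

-- ===== CLAIM (what is proved, stated in full; the proofs are below) =====
def Claim_equal_calculate_white_space_py : Prop := ∀ (docs : Option String), Dom_calculate_white_space_py docs → Spec_calculate_white_space_py docs (calculate_white_space_py docs)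

-- ===== LEMMAS AND PROOFS =====

-- case analysis of one update step of B's loop
theorem pvStep_char (acc : Option Int) (y : Int) :
    (pvMinPosStep acc y = none → acc = none ∧ ¬ 0 < y) ∧
    (∀ a, pvMinPosStep acc y = some a →
       ((a = y ∧ 0 < y) ∨ acc = some a) ∧ (0 < y → a ≤ y) ∧ (∀ b, acc = some b → a ≤ b)) := by
  rcases acc with _ | b
  · by_cases hy : 0 < y
    · have e : pvMinPosStep none y = some y := by simp [pvMinPosStep, hy]
      refine ⟨fun h => absurd h (by simp [e]), ?_⟩
      intro a ha
      rw [e] at ha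
      injection ha with h
      subst h
      exact ⟨Or.inl ⟨rfl, hy⟩, fun _ => le_refl _, fun c hc => nomatch hc⟩
    · have e : pvMinPosStep none y = none := by simp [pvMinPosStep, hy]
      refine ⟨fun _ => ⟨rfl, hy⟩, ?_⟩
      intro a ha
      rw [e] at ha
      cases ha
  · by_cases hy : 0 < y
    · by_cases h2 : y < b
      · have e : pvMinPosStep (some b) y = some y := by simp [pvMinPosStep, hy, h2]
        refine ⟨fun h => absurd h (by simp [e]), ?_⟩
        intro a ha
        rw [e] at ha
        injection ha with h
        subst h
        exact ⟨Or.inl ⟨rfl, hy⟩, fun _ => le_refl _,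
          fun c hc => by injection hc with h; omega⟩
      · have e : pvMinPosStep (some b) y = some b := by simp [pvMinPosStep, hy, h2]
        refine ⟨fun h => absurd h (by simp [e]), ?_⟩
        intro a ha
        rw [e] at ha
        injection ha with h
        subst h
        exact ⟨Or.inr rfl, fun _ => by omega, fun c hc => by injection hc with h; omega⟩
    · have e : pvMinPosStep (some b) y = some b := by simp [pvMinPosStep, hy]
      refine ⟨fun h => absurd h (by simp [e]), ?_⟩
      intro a ha
      rw [e] at ha
      injection ha with h
      subst h
      exact ⟨Or.inr rfl, fun hyy => absurd hyy hy, fun c hc => by injection hc with h; omega⟩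

-- invariant of B's fold: the result is positive, comes from the list or the accumulator,
-- and is a lower bound on all positive list elements and on the accumulator
theorem pvFold_inv (ys : List Int) : ∀ (acc : Option Int),
    (∀ a, acc = some a → 0 < a) →
    match ys.foldl pvMinPosStep acc with
    | none => acc = none ∧ ∀ y ∈ ys, ¬ 0 < y
    | some m => 0 < m ∧ (m ∈ ys ∨ acc = some m) ∧ (∀ y ∈ ys, 0 < y → m ≤ y) ∧
        (∀ a, acc = some a → m ≤ a) := by
  induction ys with
  | nil =>
      intro acc hacc
      simp only [List.foldl_nil]
      rcases acc with _ | a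
      · exact ⟨rfl, by simp⟩
      · exact ⟨hacc a rfl, Or.inr rfl, by simp, fun b hb => by injection hb with h; omega⟩
  | cons y t ih =>
      intro acc hacc
      obtain ⟨Pn, Ps⟩ := pvStep_char acc y
      have hacc' : ∀ a, pvMinPosStep acc y = some a → 0 < a := by
        intro a ha
        rcases (Ps a ha).1 with ⟨h, hp⟩ | h
        · omega
        · exact hacc a h
      have IH := ih (pvMinPosStep acc y) hacc'
      simp only [List.foldl_cons]
      rcases hr : t.foldl pvMinPosStep (pvMinPosStep acc y) with _ | m <;> rw [hr] at IH
      · obtain ⟨h1, h2⟩ := IH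
        obtain ⟨ha0, hy0⟩ := Pn h1
        refine ⟨ha0, ?_⟩
        intro z hz
        rcases List.mem_cons.mp hz with rfl | hz
        · exact hy0
        · exact h2 z hz
      · obtain ⟨hpos, hmem, hlb, hub⟩ := IH
        refine ⟨hpos, ?_, ?_, ?_⟩
        · rcases hmem with hm | hm
          · exact Or.inl (List.mem_cons_of_mem _ hm)
          · rcases (Ps m hm).1 with ⟨h, -⟩ | h
            · exact Or.inl (by simp [h])
            · exact Or.inr h
        · intro z hz hzp
          rcases List.mem_cons.mp hz with rfl | hz
          · rcases h' : pvMinPosStep acc z with _ | a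
            · exact absurd hzp (Pn h').2
            · have h3 := hub a h'
              have h4 := (Ps a h').2.1 hzp
              omega
          · exact hlb z hz hzp
        · intro b hb
          rcases h' : pvMinPosStep acc y with _ | a
          · rw [(Pn h').1] at hb; exact nomatch hb
          · have h3 := hub a h'
            have h4 := (Ps a h').2.2 b hb
            omega

-- A's sorted-filtered-set head equals B's running minimum, as a fact about the indent list
theorem pvCore (ys : List Int) :
    (match PySem.List.sorted ((PySem.Set.ofList ys).filter (fun x => decide (0 < x))) (fun x => x) with
     | [] => (0 : Int)
     | x :: _ => x)
    = (ys.foldl pvMinPosStep none).getD 0 := by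
  have hinv := pvFold_inv ys none (by simp)
  rcases hr : ys.foldl pvMinPosStep none with _ | m <;> rw [hr] at hinv
  · obtain ⟨-, hnone⟩ := hinv
    have hfil : (PySem.Set.ofList ys).filter (fun x => decide (0 < x)) = [] := by
      apply List.filter_eq_nil_iff.mpr
      intro x hx
      have : x ∈ ys := (PySem.Set.mem_ofList ys x).mp hx
      simpa using hnone x this
    rw [hfil]
    have hs : PySem.List.sorted ([] : List Int) (fun x => x) = [] :=
      (PySem.List.sorted_eq_nil_iff _ _ _).mpr rfl
    rw [hs]
    rfl
  · obtain ⟨hpos, hmem, hlb, -⟩ := hinv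
    have hmem' : m ∈ ys := by
      rcases hmem with h | h
      · exact h
      · exact nomatch h
    have hmfil : m ∈ (PySem.Set.ofList ys).filter (fun x => decide (0 < x)) :=
      List.mem_filter.mpr ⟨(PySem.Set.mem_ofList ys m).mpr hmem', by simpa using hpos⟩
    rcases hs : PySem.List.sorted ((PySem.Set.ofList ys).filter (fun x => decide (0 < x))) (fun x => x) with _ | ⟨h, t⟩
    · rw [PySem.List.sorted_eq_nil_iff] at hs
      rw [hs] at hmfil
      simp at hmfil
    · have hh : h ∈ (PySem.Set.ofList ys).filter (fun x => decide (0 < x)) := by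
        have hmem2 : h ∈ PySem.List.sorted ((PySem.Set.ofList ys).filter (fun x => decide (0 < x))) (fun x => x) := by
          rw [hs]; exact List.mem_cons_self
        exact (PySem.List.mem_sorted _ _ _ _).mp hmem2
      have hhy : h ∈ ys := (PySem.Set.mem_ofList ys h).mp (List.mem_filter.mp hh).1
      have hhp : (0 : Int) < h := by simpa using (List.mem_filter.mp hh).2
      have h1 : h ≤ m := PySem.List.key_head_sorted_le _ _ hs m hmfil
      have h2 : m ≤ h := hlb h hhy hhp
      simp only [Option.getD_some]
      omega

-- ===== VERDICT (by name: the statement is the Claim_ definition above) =====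
theorem calculate_white_space_py_spec : Claim_equal_calculate_white_space_py := by
  intro docs _
  unfold Spec_calculate_white_space_py
  cases docs with
  | none => rfl
  | some d =>
      simp only [calculate_white_space_py, calculate_white_space_py_alt]
      generalize PySem.List.slice (PySem.Str.splitlines (String.ofList (pvExpandTabs4 d.toList))) (some 1) none = L
      rw [← List.foldl_map]
      exact pvCore _
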